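-- pv_equiv track=rewrite | github.com/Mureamas/TestGit04 | Desktop/badgenius/app.py | convert_to_40_chars
-- ===== SOURCE A (Python) =====
-- encoding_dict = {
--     'aa': 'A', 'ab': 'B', 'ac': 'C', 'ad': 'D',
--     'ba': 'E', 'bb': 'F', 'bc': 'G', 'bd': 'H',
--     'ca': 'I', 'cb': 'J', 'cc': 'K', 'cd': 'L',
--     'da': 'M', 'db': 'N', 'dc': 'O', 'dd': 'P'
-- }
--
-- def convert_to_40_chars(input_string):
--     result = ""
--     for char in input_string:
--         for key, value in encoding_dict.items():
--             if char == value: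
--                 result += key
--                 break
--     return result
-- ===== SOURCE B (Python) =====
-- def convert_to_40_chars(input_string):
--     parts = []
--     for ch in input_string:
--         if 'A' <= ch <= 'P':
--             i = ord(ch) - ord('A')
--             parts.append('abcd'[i // 4] + 'abcd'[i % 4])
--     return ''.join(parts)
-- ===== Notes on version B (the rewrite author's own statement) =====
-- stated objective: simpler
-- what changed: Replaces the per-character scan of the 16-entry reverse dict with an arithmetic closed form: a char in the mapped range is base-4 encoded as two letters from its ordinal offset, other chars are skipped.
import Mathlib
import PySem

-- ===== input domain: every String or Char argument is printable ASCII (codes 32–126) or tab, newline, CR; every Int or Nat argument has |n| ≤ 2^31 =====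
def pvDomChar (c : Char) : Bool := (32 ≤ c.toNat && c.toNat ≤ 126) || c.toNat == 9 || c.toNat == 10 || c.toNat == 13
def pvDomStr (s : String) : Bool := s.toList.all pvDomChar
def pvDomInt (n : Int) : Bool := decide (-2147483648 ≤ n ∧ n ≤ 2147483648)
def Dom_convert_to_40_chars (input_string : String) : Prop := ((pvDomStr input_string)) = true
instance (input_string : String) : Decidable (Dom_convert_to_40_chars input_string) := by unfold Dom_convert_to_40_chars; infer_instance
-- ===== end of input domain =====

-- B replaces A's per-character scan of the 16-entry reverse dict with an arithmetic
-- closed form (base-4 encoding of ord(ch)-ord('A')); objective: simpler.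

-- ===== PORT A =====
-- encoding_dict.items() in insertion order
def pvEncPairs : List (String × String) :=
  [("aa", "A"), ("ab", "B"), ("ac", "C"), ("ad", "D"),
   ("ba", "E"), ("bb", "F"), ("bc", "G"), ("bd", "H"),
   ("ca", "I"), ("cb", "J"), ("cc", "K"), ("cd", "L"),
   ("da", "M"), ("db", "N"), ("dc", "O"), ("dd", "P")]

-- the inner 'for key, value ... if char == value: result += key; break' loop
-- (char == value compares the 1-char string char with the value string)
def pvInnerA (result : String) (c : Char) : String :=
  match pvEncPairs.find? (fun kv => [c] == kv.2.toList) with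
  | some kv => result ++ kv.1
  | none => result

def convert_to_40_chars (input_string : String) : String :=
  input_string.toList.foldl pvInnerA ""

-- ===== PORT B =====
-- one character's contribution in B: 'abcd'[i//4] + 'abcd'[i%4] if 'A' <= ch <= 'P', else nothing
def pvAltChar (c : Char) : List Char :=
  if 'A' ≤ c ∧ c ≤ 'P' then
    let i := c.toNat - 65
    [['a', 'b', 'c', 'd'].getD (i / 4) 'a', ['a', 'b', 'c', 'd'].getD (i % 4) 'a']
  else []

def convert_to_40_chars_alt (input_string : String) : String :=
  String.ofList (input_string.toList.flatMap pvAltChar)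

-- ===== PRECONDITION & SPEC =====
def Spec_convert_to_40_chars (input_string : String) (out : String) : Prop := out = convert_to_40_chars_alt input_string
instance (input_string : String) (out : String) : Decidable (Spec_convert_to_40_chars input_string out) := by unfold Spec_convert_to_40_chars; infer_instance

-- ===== CLAIM (what is proved, stated in full; the proofs are below) =====
def Claim_equal_convert_to_40_chars : Prop := ∀ (input_string : String), Dom_convert_to_40_chars input_string → Spec_convert_to_40_chars input_string (convert_to_40_chars input_string)

-- ===== LEMMAS AND PROOFS =====

-- the key A's inner scan appends for character c ("" if no dict value matches)
def pvKeyOf (c : Char) : String :=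
  match pvEncPairs.find? (fun kv => [c] == kv.2.toList) with
  | some kv => kv.1
  | none => ""

theorem pvInnerA_append (result : String) (c : Char) :
    pvInnerA result c = result ++ pvKeyOf c := by
  unfold pvInnerA pvKeyOf
  cases pvEncPairs.find? (fun kv => [c] == kv.2.toList) with
  | none => simp
  | some kv => rfl

-- per-character agreement: A's dict-scan key is exactly B's arithmetic pair
theorem pvKeyOf_eq_altChar (c : Char) : pvKeyOf c = String.ofList (pvAltChar c) := by
  by_cases h1 : c = 'A'; · subst h1; decide
  by_cases h2 : c = 'B'; · subst h2; decide
  by_cases h3 : c = 'C'; · subst h3; decide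
  by_cases h4 : c = 'D'; · subst h4; decide
  by_cases h5 : c = 'E'; · subst h5; decide
  by_cases h6 : c = 'F'; · subst h6; decide
  by_cases h7 : c = 'G'; · subst h7; decide
  by_cases h8 : c = 'H'; · subst h8; decide
  by_cases h9 : c = 'I'; · subst h9; decide
  by_cases h10 : c = 'J'; · subst h10; decide
  by_cases h11 : c = 'K'; · subst h11; decide
  by_cases h12 : c = 'L'; · subst h12; decide
  by_cases h13 : c = 'M'; · subst h13; decide
  by_cases h14 : c = 'N'; · subst h14; decide
  by_cases h15 : c = 'O'; · subst h15; decide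
  by_cases h16 : c = 'P'; · subst h16; decide
  -- c is none of 'A'..'P': A's scan finds nothing and B's guard is false
  have hout : ¬ ('A' ≤ c ∧ c ≤ 'P') := by
    rintro ⟨hl, hr⟩
    have hln : (65 : Nat) ≤ c.val.toNat := UInt32.le_iff_toNat_le.mp hl
    have hrn : c.val.toNat ≤ 80 := UInt32.le_iff_toNat_le.mp hr
    have hne : ∀ d : Char, c ≠ d → c.val.toNat ≠ d.val.toNat := by
      intro d hcd he
      exact hcd (Char.ext (UInt32.toNat_inj.mp he))
    have n1 := hne 'A' h1; have n2 := hne 'B' h2; have n3 := hne 'C' h3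
    have n4 := hne 'D' h4; have n5 := hne 'E' h5; have n6 := hne 'F' h6
    have n7 := hne 'G' h7; have n8 := hne 'H' h8; have n9 := hne 'I' h9
    have n10 := hne 'J' h10; have n11 := hne 'K' h11; have n12 := hne 'L' h12
    have n13 := hne 'M' h13; have n14 := hne 'N' h14; have n15 := hne 'O' h15
    have n16 := hne 'P' h16
    simp only [show ('A' : Char).val.toNat = 65 from rfl, show ('B' : Char).val.toNat = 66 from rfl,
      show ('C' : Char).val.toNat = 67 from rfl, show ('D' : Char).val.toNat = 68 from rfl,
      show ('E' : Char).val.toNat = 69 from rfl, show ('F' : Char).val.toNat = 70 from rfl,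
      show ('G' : Char).val.toNat = 71 from rfl, show ('H' : Char).val.toNat = 72 from rfl,
      show ('I' : Char).val.toNat = 73 from rfl, show ('J' : Char).val.toNat = 74 from rfl,
      show ('K' : Char).val.toNat = 75 from rfl, show ('L' : Char).val.toNat = 76 from rfl,
      show ('M' : Char).val.toNat = 77 from rfl, show ('N' : Char).val.toNat = 78 from rfl,
      show ('O' : Char).val.toNat = 79 from rfl, show ('P' : Char).val.toNat = 80 from rfl]
      at n1 n2 n3 n4 n5 n6 n7 n8 n9 n10 n11 n12 n13 n14 n15 n16
    omega
  have hfind : pvEncPairs.find? (fun kv => [c] == kv.2.toList) = none := by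
    rw [List.find?_eq_none]
    intro kv hkv
    simp only [pvEncPairs, List.mem_cons, List.not_mem_nil, or_false] at hkv
    rcases hkv with h|h|h|h|h|h|h|h|h|h|h|h|h|h|h|h <;> subst h <;>
      simp_all
  simp [pvKeyOf, hfind, pvAltChar, hout]

theorem pvFold_eq (l : List Char) (res : String) :
    l.foldl pvInnerA res = res ++ String.ofList (l.flatMap pvAltChar) := by
  induction l generalizing res with
  | nil => simp
  | cons c t ih =>
      rw [List.foldl_cons, pvInnerA_append, ih, pvKeyOf_eq_altChar, List.flatMap_cons,
        String.ofList_append, String.append_assoc]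

-- ===== VERDICT (by name: the statement is the Claim_ definition above) =====
theorem convert_to_40_chars_spec : Claim_equal_convert_to_40_chars := by
  intro s _
  show convert_to_40_chars s = convert_to_40_chars_alt s
  rw [convert_to_40_chars, convert_to_40_chars_alt, pvFold_eq]
  simp
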